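-- pv_equiv track=rewrite | github.com/raianyrufino/Advanced-Algorithms | Lista 1 - Ad hoc/F - Broken Keyboard.py | no_duplicates
-- ===== SOURCE A (Python) =====
-- def no_duplicates(string):
--   size = len(string)
--   answer = ''
--   j = 0
--
--   if (size <= 1):
--     return answer
--   else:
--     while(j < size):
--       if (j != size-1):
--         if(string[j] != string[j+1]):
--           if (string[j] not in answer):
--             answer += string[j]
--           j+=1
--         else:
--           j+=2
--       else:
--         if(string[j] not in answer):
--           answer += string[j]
--         j += 1
--   return answer
-- ===== SOURCE B (Python) =====
-- def no_duplicates(string):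
--   if len(string) <= 1:
--     return ''
--   # A maximal run of k equal characters contributes one copy of its character
--   # iff k is odd (the index scan consumes pairs within the run and never
--   # crosses a run boundary mid-pair), so group into runs and keep odd ones.
--   kept = []
--   run_char = string[0]
--   odd = True
--   for c in string[1:]:
--     if c == run_char:
--       odd = not odd
--     else:
--       if odd:
--         kept.append(run_char)
--       run_char = c
--       odd = True
--   if odd:
--     kept.append(run_char)
--   # first-occurrence dedup, insertion-ordered
--   return ''.join(dict.fromkeys(kept))
-- ===== Notes on version B (the rewrite author's own statement) =====
-- stated objective: faster
-- what changed: Replaces the index-jumping while loop that interleaves pair-skipping with a substring membership scan of the growing answer by a run-length-parity characterization: a maximal run of equal characters survives iff its length is odd, so B groups the string into runs with a parity flag and then deduplicates the surviving characters once with dict.fromkeys.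
import Mathlib
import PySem

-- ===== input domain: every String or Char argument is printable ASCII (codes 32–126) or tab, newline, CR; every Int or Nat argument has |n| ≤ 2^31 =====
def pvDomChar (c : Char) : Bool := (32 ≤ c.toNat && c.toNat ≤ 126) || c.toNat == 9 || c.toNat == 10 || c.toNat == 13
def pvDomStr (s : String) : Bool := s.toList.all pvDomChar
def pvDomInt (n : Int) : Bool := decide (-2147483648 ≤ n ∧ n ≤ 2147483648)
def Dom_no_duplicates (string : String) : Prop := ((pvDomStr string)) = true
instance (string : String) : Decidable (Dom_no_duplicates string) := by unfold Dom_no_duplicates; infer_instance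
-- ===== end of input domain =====

-- B replaces A's index-jumping while loop (which interleaves pair-skipping with a
-- membership scan of the answer built so far) by run-length parity: a maximal run of
-- equal characters survives iff its length is odd; then one ordered dedup. Objective: faster (constant factor).

-- ===== PORT A =====
-- A's while loop over index j (j += 1 / j += 2); j is always in range when used,
-- so string[j] is ported exactly as s.getD j (default never read).
def pvLoopA (s : List Char) (size : Nat) (j : Nat) (answer : List Char) : List Char :=
  if _h : j < size then
    if j ≠ size - 1 then
      if s.getD j ' ' ≠ s.getD (j+1) ' ' then
        pvLoopA s size (j+1)
          (if answer.contains (s.getD j ' ') then answer else answer ++ [s.getD j ' '])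
      else
        pvLoopA s size (j+2) answer
    else
      pvLoopA s size (j+1)
        (if answer.contains (s.getD j ' ') then answer else answer ++ [s.getD j ' '])
  else answer
termination_by size - j

def no_duplicates (string : String) : String :=
  let s := string.toList
  let size := s.length
  if size ≤ 1 then "" else String.ofList (pvLoopA s size 0 [])

-- ===== PORT B =====
-- the loop body of Source B: state (run_char, odd, kept)
def pvRunStep (st : Char × Bool × List Char) (c : Char) : Char × Bool × List Char :=
  match st with
  | (r, odd, kept) =>
    if c == r then (r, !odd, kept)
    else (c, true, if odd then kept ++ [r] else kept)

-- the trailing "if odd: kept.append(run_char)" of Source B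
def pvRunFinish (st : Char × Bool × List Char) : List Char :=
  if st.2.1 then st.2.2 ++ [st.1] else st.2.2

def no_duplicates_alt (string : String) : String :=
  match string.toList with          -- len(string) <= 1 -> ''
  | [] => ""
  | [_] => ""
  | c0 :: rest =>                   -- run_char = string[0]; loop over string[1:]
    let kept := pvRunFinish (rest.foldl pvRunStep (c0, true, []))
    String.ofList (PySem.List.dedup kept)   -- ''.join(dict.fromkeys(kept))

-- ===== PRECONDITION & SPEC =====
def Spec_no_duplicates (string : String) (out : String) : Prop := out = no_duplicates_alt string
instance (string : String) (out : String) : Decidable (Spec_no_duplicates string out) := by unfold Spec_no_duplicates; infer_instance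

-- ===== CLAIM =====
def Claim_equal_no_duplicates : Prop := ∀ (string : String), Dom_no_duplicates string → Spec_no_duplicates string (no_duplicates string)

-- ===== LEMMAS AND PROOFS =====

-- the surviving characters of A's pair-skipping scan, as a structural recursion
def pvKeep : List Char → List Char
  | [] => []
  | [c] => [c]
  | a :: b :: r => if a = b then pvKeep r else a :: pvKeep (b :: r)

-- A's interleaved dedup, isolated
def pvDedupGo (answer : List Char) : List Char → List Char
  | [] => answer
  | c :: r => pvDedupGo (if answer.contains c then answer else answer ++ [c]) r

lemma pvLoopA_eq (s : List Char) (j : Nat) (answer : List Char) (hj : j ≤ s.length) :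
    pvLoopA s s.length j answer = pvDedupGo answer (pvKeep (s.drop j)) := by
  by_cases h : j < s.length
  · rw [pvLoopA, dif_pos h]
    have hd : s.drop j = s[j] :: s.drop (j+1) := List.drop_eq_getElem_cons h
    by_cases hl : j ≠ s.length - 1
    · have h1 : j + 1 < s.length := by omega
      have hd1 : s.drop (j+1) = s[j+1] :: s.drop (j+2) := List.drop_eq_getElem_cons h1
      have e0 : s.getD j ' ' = s[j] := List.getD_eq_getElem s ' ' h
      have e1 : s.getD (j+1) ' ' = s[j+1] := List.getD_eq_getElem s ' ' h1
      rw [if_pos hl, e0, e1, hd, hd1, pvKeep]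
      by_cases heq : s[j] = s[j+1]
      · rw [if_neg (by simpa using heq), if_pos heq,
          pvLoopA_eq s (j+2) answer (by omega)]
      · rw [if_pos heq, if_neg heq, pvLoopA_eq s (j+1) _ (by omega), hd1]
        simp [pvDedupGo]
    · have e0 : s.getD j ' ' = s[j] := List.getD_eq_getElem s ' ' h
      have hnil : s.drop (j+1) = [] := List.drop_eq_nil_of_le (by omega)
      rw [if_neg (by simpa using hl), e0, pvLoopA_eq s (j+1) _ (by omega), hnil,
        hd, hnil]
      simp [pvKeep, pvDedupGo]
  · have hje : j = s.length := by omega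
    rw [pvLoopA, dif_neg h, hje, List.drop_length, pvKeep, pvDedupGo]
termination_by s.length - j

-- run-parity invariant: B's loop over the rest, started in state (r, odd, kept),
-- finishes with kept ++ the pair-skipping survivors of the unconsumed suffix
lemma pvRun_eq (l : List Char) (r : Char) (odd : Bool) (kept : List Char) :
    pvRunFinish (l.foldl pvRunStep (r, odd, kept))
    = kept ++ pvKeep ((if odd then [r] else [r, r]) ++ l) := by
  induction l generalizing r odd kept with
  | nil => cases odd <;> simp [pvRunFinish, pvKeep]
  | cons c t ih =>
    by_cases hcr : c = r
    · have hstep : pvRunStep (r, odd, kept) c = (r, !odd, kept) := by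
        simp [pvRunStep, hcr]
      rw [List.foldl_cons, hstep, ih]
      cases odd <;> simp [pvKeep, hcr]
    · have hbe : (c == r) = false := by simpa using hcr
      have hstep : pvRunStep (r, odd, kept) c
        = (c, true, if odd then kept ++ [r] else kept) := by
        simp [pvRunStep, hbe]
      rw [List.foldl_cons, hstep, ih]
      cases odd <;> simp [pvKeep, Ne.symm hcr]

-- A's interleaved dedup from the empty answer IS dict.fromkeys
lemma pvDedupGo_eq_dedup (l : List Char) :
    pvDedupGo [] l = PySem.List.dedup l := by
  have go : ∀ (l acc : List Char),
      pvDedupGo acc l = l.foldl PySem.Set.add acc := by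
    intro l
    induction l with
    | nil => intro acc; rfl
    | cons c t ih =>
      intro acc
      rw [pvDedupGo, List.foldl_cons, ih]
      rfl
  rw [PySem.List.dedup_eq_ofList, PySem.Set.ofList_eq_foldl, go]

-- ===== VERDICT =====
theorem no_duplicates_spec : Claim_equal_no_duplicates := by
  intro string _
  unfold Spec_no_duplicates no_duplicates no_duplicates_alt
  cases hs : string.toList with
  | nil => simp
  | cons c0 rest =>
    cases rest with
    | nil => simp
    | cons c1 t =>
      have hlen : ¬ (c0 :: c1 :: t).length ≤ 1 := by simp
      simp only [hlen]
      rw [pvLoopA_eq (c0 :: c1 :: t) 0 [] (by omega), List.drop_zero,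
        pvRun_eq, pvDedupGo_eq_dedup]
      simp
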